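-- pv_equiv track=rewrite | github.com/pypi-data/pypi-mirror-195 | packages/wammodels/wammodels-0.0.11-py3-none-any.whl/wammodels/combination.py | get_check_coef
-- ===== SOURCE A (Python) =====
-- def get_check_coef(coef_get,coef):
-- 	count_total_coef = 0
-- 	for count,value in enumerate(coef_get):
-- 		if value != "":
-- 			if value == "+" and coef[count] > 0:
-- 				count_total_coef += 1
-- 			elif value == "-" and coef[count] <0:
-- 				count_total_coef +=1
-- 	non_empty_values = [val for val in coef_get if val != '']
-- 	count32 = len(non_empty_values)
-- 	if count32 == count_total_coef:
-- 		return True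
--
-- 	return False
-- ===== SOURCE B (Python) =====
-- def get_check_coef(coef_get, coef):
--     def ok(i):
--         v = coef_get[i]
--         if v == "":
--             return True
--         if v == "+":
--             return coef[i] > 0
--         if v == "-":
--             return coef[i] < 0
--         return False
--
--     def go(lo, hi):
--         if hi - lo <= 1:
--             return hi - lo == 0 or ok(lo)
--         mid = (lo + hi) // 2
--         return go(lo, mid) and go(mid, hi)
--
--     return go(0, len(coef_get))
-- ===== Notes on version B (the rewrite author's own statement) =====
-- stated objective: alternative
-- what changed: Replaces A's two staged counting passes (count matching entries, count non-empty entries, compare the counts) with a stateless divide-and-conquer recursion that splits the index range in half and conjoins the per-entry checks, short-circuiting at the first mismatch.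
import Mathlib
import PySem

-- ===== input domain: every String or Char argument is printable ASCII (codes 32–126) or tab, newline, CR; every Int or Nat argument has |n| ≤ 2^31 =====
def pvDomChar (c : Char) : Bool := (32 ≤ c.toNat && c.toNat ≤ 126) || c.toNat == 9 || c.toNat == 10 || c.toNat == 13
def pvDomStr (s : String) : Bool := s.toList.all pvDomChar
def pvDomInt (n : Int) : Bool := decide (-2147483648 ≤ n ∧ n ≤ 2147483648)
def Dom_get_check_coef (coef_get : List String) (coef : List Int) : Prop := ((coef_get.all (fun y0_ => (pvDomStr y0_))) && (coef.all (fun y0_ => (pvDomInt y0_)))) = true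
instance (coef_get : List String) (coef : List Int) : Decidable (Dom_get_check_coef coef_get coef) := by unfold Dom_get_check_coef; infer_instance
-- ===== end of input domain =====

-- B replaces A's two staged counting passes (matching count vs non-empty count, compared)
-- with a stateless divide-and-conquer recursion over the index range that conjoins per-entry sign checks (alternative decomposition).


-- ===== PORT A =====
-- coef[count] is only evaluated when value is "+" / "-"; under Pre_ the index is in range,
-- so `(pyGet? …).getD 0` is exact there (outside Pre_ Python raises IndexError).
def get_check_coef (coef_get : List String) (coef : List Int) : Bool :=
  let count_total_coef : Int :=
    (PySem.List.enumerate coef_get 0).foldl (fun acc p =>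
      if p.2 ≠ "" then
        if p.2 == "+" && decide (0 < (PySem.List.pyGet? coef p.1).getD 0) then acc + 1
        else if p.2 == "-" && decide ((PySem.List.pyGet? coef p.1).getD 0 < 0) then acc + 1
        else acc
      else acc) 0
  let non_empty_values : List String := coef_get.filter (fun val => val ≠ "")
  let count32 : Int := (non_empty_values.length : Int)
  if count32 = count_total_coef then true else false

-- ===== PORT B =====
-- B's per-entry check ok(i)
def pvOkB (coef_get : List String) (coef : List Int) (i : Nat) : Bool :=
  let v := (PySem.List.pyGet? coef_get (i : Int)).getD ""
  if v = "" then true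
  else if v = "+" then decide (0 < (PySem.List.pyGet? coef (i : Int)).getD 0)
  else if v = "-" then decide ((PySem.List.pyGet? coef (i : Int)).getD 0 < 0)
  else false

-- B's divide-and-conquer go(lo, hi) over the index range [lo, hi)
def pvGoB (coef_get : List String) (coef : List Int) (lo hi : Nat) : Bool :=
  if hi - lo ≤ 1 then (hi - lo == 0) || pvOkB coef_get coef lo
  else
    let mid := (lo + hi) / 2
    pvGoB coef_get coef lo mid && pvGoB coef_get coef mid hi
termination_by hi - lo
decreasing_by all_goals omega

def get_check_coef_alt (coef_get : List String) (coef : List Int) : Bool :=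
  pvGoB coef_get coef 0 coef_get.length

-- ===== PRECONDITION & SPEC =====
-- Pre_ excludes exactly the inputs where Python A raises IndexError: a "+" or "-" entry
-- whose position is not a valid index into coef.
def Pre_get_check_coef (coef_get : List String) (coef : List Int) : Prop :=
  ∀ i : Fin coef_get.length, (coef_get.get i = "+" ∨ coef_get.get i = "-") → (i : Nat) < coef.length
instance (coef_get : List String) (coef : List Int) : Decidable (Pre_get_check_coef coef_get coef) := by unfold Pre_get_check_coef; infer_instance

def pvWitness_get_check_coef : List String × List Int := (["+", "", "-", "x"], [2, 5, -1, 0])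

def Spec_get_check_coef (coef_get : List String) (coef : List Int) (out : Bool) : Prop := out = get_check_coef_alt coef_get coef
instance (coef_get : List String) (coef : List Int) (out : Bool) : Decidable (Spec_get_check_coef coef_get coef out) := by unfold Spec_get_check_coef; infer_instance

-- ===== CLAIM (what is proved, stated in full; the proofs are below) =====
def Claim_equal_get_check_coef : Prop := ∀ (coef_get : List String) (coef : List Int), Dom_get_check_coef coef_get coef → Pre_get_check_coef coef_get coef → Spec_get_check_coef coef_get coef (get_check_coef coef_get coef)

-- ===== LEMMAS AND PROOFS =====

-- the "matched" test of A, on an (index, value) pair from enumerate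
def pvM (coef : List Int) (p : Int × String) : Bool :=
  (p.2 == "+" && decide (0 < (PySem.List.pyGet? coef p.1).getD 0))
    || (p.2 == "-" && decide ((PySem.List.pyGet? coef p.1).getD 0 < 0))

lemma pv_countP_le (q m : Int × String → Bool) (l : List (Int × String)) :
    l.countP (fun p => q p && m p) ≤ l.countP q := by
  apply List.countP_mono_left
  intro x _ h
  exact (Bool.and_elim_left h)

lemma pv_countP_eq_iff (q m : Int × String → Bool) (l : List (Int × String)) :
    l.countP q = l.countP (fun p => q p && m p) ↔ ∀ x ∈ l, q x → m x = true := by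
  induction l with
  | nil => simp
  | cons x xs ih =>
    cases hq : q x with
    | false => simp [hq, ih]
    | true =>
      cases hm : m x with
      | true => simp [hq, hm, ih]
      | false =>
        simp only [List.countP_cons, hq, hm, Bool.and_false, if_true]
        constructor
        · intro h
          exfalso
          have hle := pv_countP_le q m xs
          simp at h
          omega
        · intro h
          have := h x List.mem_cons_self hq
          simp [hm] at this

-- pvOkB at an in-range index is A's non-empty guard + match test on (k, coef_get[k])
lemma pv_okB_eq (coef_get : List String) (coef : List Int) (k : Nat) (hk : k < coef_get.length) :
    pvOkB coef_get coef k
      = (if coef_get[k] ≠ "" then pvM coef ((k : Int), coef_get[k]) else true) := by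
  unfold pvOkB pvM
  simp only [PySem.List.pyGet?_natCast, List.getElem?_eq_getElem hk, Option.getD_some]
  by_cases h0 : coef_get[k] = "" <;> by_cases h1 : coef_get[k] = "+" <;>
    by_cases h2 : coef_get[k] = "-" <;> simp_all

-- A returns true iff every in-range index passes pvOkB
lemma pv_A_iff (coef_get : List String) (coef : List Int) :
    get_check_coef coef_get coef = true ↔
      ∀ k : Nat, k < coef_get.length → pvOkB coef_get coef k = true := by
  unfold get_check_coef
  simp only []
  set l := PySem.List.enumerate coef_get 0 with hl
  have hfold : l.foldl (fun acc p =>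
      if p.2 ≠ "" then
        if p.2 == "+" && decide (0 < (PySem.List.pyGet? coef p.1).getD 0) then acc + 1
        else if p.2 == "-" && decide ((PySem.List.pyGet? coef p.1).getD 0 < 0) then acc + 1
        else acc
      else acc) (0 : Int)
      = l.foldl (fun acc p =>
          if (decide (p.2 ≠ "") && pvM coef p) then acc + 1 else acc) 0 := by
    apply PySem.List.foldl_congr_mem
    intro acc p _
    unfold pvM
    by_cases h1 : p.2 = "+" <;> by_cases h2 : p.2 = "-" <;>
      simp [h1, h2]
  rw [hfold, PySem.List.foldl_if_add_one, zero_add]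
  have hcnt : (coef_get.filter (fun val => val ≠ "")).length
      = l.countP (fun p => decide (p.2 ≠ "")) := by
    rw [← List.countP_eq_length_filter]
    conv_lhs => rw [← PySem.List.map_snd_enumerate coef_get 0]
    rw [List.countP_map]
    rfl
  rw [hcnt]
  have hmem : (∀ x ∈ l, decide (x.2 ≠ "") = true → pvM coef x = true) ↔
      ∀ k : Nat, k < coef_get.length → pvOkB coef_get coef k = true := by
    constructor
    · intro h k hk
      rw [pv_okB_eq coef_get coef k hk]
      split_ifs with hne
      · exact h ((k : Int), coef_get[k])
          (by rw [hl]; exact (PySem.List.mem_enumerate_iff _ _ _).mpr ⟨k, hk, by simp⟩)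
          (by simpa using hne)
      · rfl
    · intro h x hx hq
      obtain ⟨k, hk, rfl⟩ := (PySem.List.mem_enumerate_iff _ _ _).mp (hl ▸ hx)
      have := h k hk
      rw [pv_okB_eq coef_get coef k hk] at this
      simp only [zero_add]
      rw [if_pos (by simpa using hq)] at this
      exact this
  constructor
  · intro h
    have hif : ((l.countP (fun p => decide (p.2 ≠ "")) : Int)
        = (l.countP (fun p => decide (p.2 ≠ "") && pvM coef p) : Int)) := by
      by_contra hc
      rw [if_neg hc] at h
      exact Bool.false_ne_true h
    exact hmem.mp ((pv_countP_eq_iff _ _ l).mp (by exact_mod_cast hif))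
  · intro h
    rw [if_pos (by exact_mod_cast (pv_countP_eq_iff _ _ l).mpr (hmem.mpr h))]

-- B's divide-and-conquer returns true iff every index in [lo, hi) passes pvOkB
lemma pv_goB_iff (coef_get : List String) (coef : List Int) (d : Nat) :
    ∀ lo hi : Nat, hi - lo ≤ d →
      (pvGoB coef_get coef lo hi = true ↔
        ∀ j : Nat, lo ≤ j → j < hi → pvOkB coef_get coef j = true) := by
  induction d with
  | zero =>
    intro lo hi hle
    rw [pvGoB, if_pos (by omega)]
    have h0 : (hi - lo == 0) = true := by simp; omega
    rw [h0, Bool.true_or]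
    constructor
    · intro _ j h1 h2
      omega
    · intro _
      rfl
  | succ d ih =>
    intro lo hi hle
    rw [pvGoB]
    by_cases hsm : hi - lo ≤ 1
    · rw [if_pos hsm]
      by_cases h0 : hi - lo = 0
      · have : (hi - lo == 0) = true := by simpa using h0
        rw [this, Bool.true_or]
        constructor
        · intro _ j h1 h2
          omega
        · intro _
          rfl
      · have h1 : hi = lo + 1 := by omega
        have : (hi - lo == 0) = false := by simp; omega
        rw [this, Bool.false_or]
        constructor
        · intro h j hj1 hj2
          have : j = lo := by omega
          rwa [this]
        · intro h
          exact h lo (Nat.le_refl lo) (by omega)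
    · rw [if_neg hsm]
      simp only [Bool.and_eq_true]
      rw [ih lo ((lo + hi) / 2) (by omega), ih ((lo + hi) / 2) hi (by omega)]
      constructor
      · rintro ⟨hL, hR⟩ j hj1 hj2
        by_cases hj : j < (lo + hi) / 2
        · exact hL j hj1 hj
        · exact hR j (by omega) hj2
      · intro h
        exact ⟨fun j hj1 hj2 => h j hj1 (by omega),
               fun j hj1 hj2 => h j (by omega) hj2⟩

theorem get_check_coef_spec_aux (coef_get : List String) (coef : List Int) :
    get_check_coef coef_get coef = get_check_coef_alt coef_get coef := by
  have hA := pv_A_iff coef_get coef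
  have hB := pv_goB_iff coef_get coef coef_get.length 0 coef_get.length (by omega)
  unfold get_check_coef_alt
  cases ha : get_check_coef coef_get coef <;> cases hb : pvGoB coef_get coef 0 coef_get.length
  · rfl
  · exfalso
    have := hB.mp hb
    exact absurd (hA.mpr (fun k hk => this k (Nat.zero_le k) hk)) (by simp [ha])
  · exfalso
    have := hA.mp ha
    exact absurd (hB.mpr (fun j _ hj => this j hj)) (by simp [hb])
  · rfl

-- ===== VERDICT (by name: the statement is the Claim_ definition above) =====
theorem get_check_coef_spec : Claim_equal_get_check_coef := by
  intro coef_get coef _ _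
  exact get_check_coef_spec_aux coef_get coef
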